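-- pv_equiv track=rewrite | github.com/Mikhail-Ark/diab_stats | libs/fast_forward_pipeline.py | choose_cats
-- ===== SOURCE A (Python) =====
-- def choose_cats(s, cat_names):
--     ns = s.strip().lower()
--     words = ns.split()
--     rel_cats = set()
--     if len(words) == 0:
--         return set(range(len(cat_names)))
--
--     elif len(words) == 1:
--         word = words[0]
--         for i, cn in enumerate(cat_names):
--             if word in cn:
--                 rel_cats.add(i)
--     else:
--         yellow = set()
--         green = set()
--         for i, cn in enumerate(cat_names):
--             at_least_1_in = False
--             at_least_1_out = False
--             for word in words:
--                 if word in cn: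
--                     at_least_1_in = True
--                     if at_least_1_out:
--                         break
--                 else:
--                     at_least_1_out = True
--                     if at_least_1_in:
--                         break
--             if at_least_1_in:
--                 if at_least_1_out:
--                     yellow.add(i)
--                 else:
--                     green.add(i)
--         if green:
--             rel_cats = green
--         else:
--             rel_cats = yellow
--
--     return rel_cats
-- ===== SOURCE B (Python) =====
-- def choose_cats(s, cat_names):
--     words = s.strip().lower().split()
--     if not words:
--         return set(range(len(cat_names)))
--     green = {i for i, cn in enumerate(cat_names) if all(w in cn for w in words)}
--     if green:
--         return green
--     return {i for i, cn in enumerate(cat_names) if any(w in cn for w in words)}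
-- ===== Notes on version B (the rewrite author's own statement) =====
-- stated objective: simpler
-- what changed: Replaces A's single classifying pass (separate one-word branch plus a two-flag inner loop with early breaks maintaining both green and yellow sets) by two staged comprehension passes: first collect categories containing ALL words and return them if any exist, otherwise rerun over the categories collecting those containing ANY word; no yellow set or flag machinery is ever maintained, and the one-word branch disappears.
import Mathlib
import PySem

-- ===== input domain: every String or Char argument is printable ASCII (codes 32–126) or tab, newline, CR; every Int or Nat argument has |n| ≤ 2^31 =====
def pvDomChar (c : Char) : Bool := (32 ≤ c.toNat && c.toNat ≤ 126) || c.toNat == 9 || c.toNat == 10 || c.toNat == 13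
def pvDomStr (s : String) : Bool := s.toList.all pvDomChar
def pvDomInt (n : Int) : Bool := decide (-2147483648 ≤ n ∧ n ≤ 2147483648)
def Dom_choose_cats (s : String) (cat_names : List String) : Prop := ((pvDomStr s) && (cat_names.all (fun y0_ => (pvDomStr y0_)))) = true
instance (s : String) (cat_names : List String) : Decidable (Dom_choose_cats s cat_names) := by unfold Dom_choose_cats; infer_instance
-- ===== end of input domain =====

-- B replaces A's one-pass flag classification (and its one-word branch) by two staged
-- comprehension passes: all-words matches first, else any-word matches; objective: simpler.

-- ===== PORT A =====
-- A's inner 'for word in words' loop with the two flags and early breaks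
def chooseCatsFlags (cn : String) : List String → Bool → Bool → Bool × Bool
  | [], aIn, aOut => (aIn, aOut)
  | w :: ws, aIn, aOut =>
    if PySem.Str.isIn w cn then
      if aOut then (true, aOut) else chooseCatsFlags cn ws true aOut
    else
      if aIn then (aIn, true) else chooseCatsFlags cn ws aIn true

-- A's loop body for the multi-word branch (state = (yellow, green))
def chooseCatsStepA (words : List String) (yg : List Int × List Int) (p : Int × String) :
    List Int × List Int :=
  let f := chooseCatsFlags p.2 words false false
  if f.1 then
    if f.2 then (PySem.Set.add yg.1 p.1, yg.2) else (yg.1, PySem.Set.add yg.2 p.1)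
  else yg

def choose_cats (s : String) (cat_names : List String) : List Int :=
  let ns := PySem.Str.lower (PySem.Str.strip s)
  let words := PySem.Str.split₀ ns
  if words.length = 0 then
    PySem.Set.ofList (PySem.List.pyRange 0 cat_names.length 1)
  else if words.length = 1 then
    let word := PySem.List.pyGetD words 0 ""
    (PySem.List.enumerate cat_names).foldl
      (fun rel p => if PySem.Str.isIn word p.2 then PySem.Set.add rel p.1 else rel)
      PySem.Set.empty
  else
    let yg := (PySem.List.enumerate cat_names).foldl (chooseCatsStepA words)
      (PySem.Set.empty, PySem.Set.empty)
    if yg.2 = [] then yg.1 else yg.2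

-- ===== PORT B =====
-- {i for i, cn in enumerate(cat_names) if all(w in cn for w in words)}
def chooseCatsGreenB (words : List String) (cats : List String) : List Int :=
  PySem.Set.ofList (((PySem.List.enumerate cats).filter
    (fun p => words.all (fun w => PySem.Str.isIn w p.2))).map (·.1))

-- {i for i, cn in enumerate(cat_names) if any(w in cn for w in words)}
def chooseCatsAnyB (words : List String) (cats : List String) : List Int :=
  PySem.Set.ofList (((PySem.List.enumerate cats).filter
    (fun p => words.any (fun w => PySem.Str.isIn w p.2))).map (·.1))

def choose_cats_alt (s : String) (cat_names : List String) : List Int :=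
  let words := PySem.Str.split₀ (PySem.Str.lower (PySem.Str.strip s))
  if words.isEmpty then
    PySem.Set.ofList (PySem.List.pyRange 0 cat_names.length 1)
  else
    let green := chooseCatsGreenB words cat_names
    if green.isEmpty then chooseCatsAnyB words cat_names else green

-- ===== PRECONDITION & SPEC =====
def Spec_choose_cats (s : String) (cat_names : List String) (out : List Int) : Prop := out = choose_cats_alt s cat_names
instance (s : String) (cat_names : List String) (out : List Int) : Decidable (Spec_choose_cats s cat_names out) := by unfold Spec_choose_cats; infer_instance

-- ===== CLAIM =====
def Claim_equal_choose_cats : Prop := ∀ (s : String) (cat_names : List String), Dom_choose_cats s cat_names → Spec_choose_cats s cat_names (choose_cats s cat_names)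

-- ===== LEMMAS AND PROOFS =====

-- the break-driven flags loop computes (any word matches, any word does not match)
theorem chooseCatsFlags_eq (cn : String) (ws : List String) (a b : Bool) :
    chooseCatsFlags cn ws a b =
      (a || ws.any (fun w => PySem.Str.isIn w cn),
       b || ws.any (fun w => !PySem.Str.isIn w cn)) := by
  induction ws generalizing a b with
  | nil => simp [chooseCatsFlags]
  | cons w ws ih =>
    cases hm : PySem.Chars.isIn w.toList cn.toList <;> cases a <;> cases b <;>
      simp [chooseCatsFlags, hm, ih]

-- a conditional Set.add fold over fresh, duplicate-free indices is filter-then-map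
theorem foldl_cond_add (q : Int × String → Bool) (l : List (Int × String)) (r : List Int)
    (hnd : (l.map (·.1)).Nodup) (hfresh : ∀ p ∈ l, p.1 ∉ r) :
    l.foldl (fun rel p => if q p then PySem.Set.add rel p.1 else rel) r
      = r ++ (l.filter q).map (·.1) := by
  induction l generalizing r with
  | nil => simp
  | cons p l ih =>
    simp only [List.map_cons, List.nodup_cons] at hnd
    have hfr : p.1 ∉ r := hfresh p (List.mem_cons_self)
    have hadd : PySem.Set.add r p.1 = r ++ [p.1] := by
      simp [PySem.Set.add, PySem.Set.contains, hfr]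
    have hfresh' : ∀ x ∈ l, x.1 ∉ r ++ [p.1] := by
      intro x hx
      simp only [List.mem_append, List.mem_singleton]
      rintro (h | h)
      · exact hfresh x (List.mem_cons_of_mem _ hx) h
      · exact hnd.1 (h ▸ List.mem_map_of_mem hx)
    cases hq : q p with
    | true =>
      simp only [List.foldl_cons, hq, if_true, hadd]
      rw [ih _ hnd.2 hfresh']
      simp [hq]
    | false =>
      simp only [List.foldl_cons, hq]
      rw [if_neg (by simp), ih _ hnd.2 (fun x hx => hfresh x (List.mem_cons_of_mem _ hx))]
      simp [hq]

-- A's pair step is two independent conditional adds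
theorem stepA_decomp (words : List String) (yg : List Int × List Int) (p : Int × String) :
    chooseCatsStepA words yg p =
      (if (words.any fun w => PySem.Str.isIn w p.2)
            && (words.any fun w => !PySem.Str.isIn w p.2) then PySem.Set.add yg.1 p.1 else yg.1,
       if (words.any fun w => PySem.Str.isIn w p.2)
            && !(words.any fun w => !PySem.Str.isIn w p.2) then PySem.Set.add yg.2 p.1 else yg.2) := by
  unfold chooseCatsStepA
  rw [chooseCatsFlags_eq]
  cases h1 : (words.any fun w => PySem.Str.isIn w p.2) <;>
    cases h2 : (words.any fun w => !PySem.Str.isIn w p.2) <;> simp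

-- a fold of componentwise-independent updates is a pair of folds
theorem foldl_pair (f : List Int → Int × String → List Int) (g : List Int → Int × String → List Int)
    (l : List (Int × String)) (y gr : List Int) :
    l.foldl (fun yg p => (f yg.1 p, g yg.2 p)) (y, gr) = (l.foldl f y, l.foldl g gr) := by
  induction l generalizing y gr with
  | nil => rfl
  | cons p l ih => simp only [List.foldl_cons]; exact ih _ _

theorem enum_fst_nodup (cats : List String) :
    ((PySem.List.enumerate cats).map (·.1)).Nodup := by
  have h := PySem.List.pairwise_lt_enumerate (xs := cats) (s := 0)
  exact (List.pairwise_map.mpr h).imp (fun hlt => Int.ne_of_lt hlt)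

theorem filtered_fst_nodup (q : Int × String → Bool) (cats : List String) :
    (((PySem.List.enumerate cats).filter q).map (·.1)).Nodup :=
  List.Sublist.nodup
    (List.Sublist.map (fun p : Int × String => p.1)
      (List.filter_sublist (l := PySem.List.enumerate cats)))
    (enum_fst_nodup cats)

-- for nonempty words, all-match implies any-match, pointwise
theorem all_imp_any (w : String) (ws : List String) (cn : String) :
    ((w :: ws).all fun x => PySem.Str.isIn x cn) = true →
      ((w :: ws).any fun x => PySem.Str.isIn x cn) = true := by
  intro h
  exact List.any_eq_true.mpr ⟨w, List.mem_cons_self, (List.all_eq_true.mp h) w List.mem_cons_self⟩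

-- ===== VERDICT =====
set_option maxHeartbeats 1000000 in
theorem choose_cats_spec : Claim_equal_choose_cats := by
  intro s cat_names _
  unfold Spec_choose_cats choose_cats choose_cats_alt
  cases hws : PySem.Str.split₀ (PySem.Str.lower (PySem.Str.strip s)) with
  | nil => simp only [hws]; simp
  | cons w ws =>
    have hgreen :
        chooseCatsGreenB (w :: ws) cat_names
          = ((PySem.List.enumerate cat_names).filter
              (fun p => (w :: ws).all (fun x => PySem.Str.isIn x p.2))).map (·.1) := by
      unfold chooseCatsGreenB
      exact PySem.Set.ofList_eq_self_of_nodup _ (filtered_fst_nodup _ cat_names)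
    have hany :
        chooseCatsAnyB (w :: ws) cat_names
          = ((PySem.List.enumerate cat_names).filter
              (fun p => (w :: ws).any (fun x => PySem.Str.isIn x p.2))).map (·.1) := by
      unfold chooseCatsAnyB
      exact PySem.Set.ofList_eq_self_of_nodup _ (filtered_fst_nodup _ cat_names)
    cases ws with
    | nil =>
      simp only [hws, List.length_cons, List.length_nil, List.isEmpty_cons,
        PySem.List.pyGetD_zero_cons]
      rw [foldl_cond_add _ _ _ (enum_fst_nodup cat_names) (by simp [PySem.Set.empty])]
      simp only [PySem.Set.empty, List.nil_append,
        if_neg (by decide : ¬ (1 : Nat) = 0), Bool.false_eq_true,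
        if_neg (fun h : False => h.elim)]
      have hga : chooseCatsGreenB [w] cat_names = chooseCatsAnyB [w] cat_names := by
        unfold chooseCatsGreenB chooseCatsAnyB; simp
      have hgf : chooseCatsGreenB [w] cat_names
          = ((PySem.List.enumerate cat_names).filter
              (fun p => PySem.Str.isIn w p.2)).map (·.1) := by
        refine hgreen.trans (congrArg (List.map (fun p : Int × String => p.1)) (List.filter_congr ?_))
        intro p _; simp
      rw [if_pos trivial, ← hgf]
      cases hE : (chooseCatsGreenB [w] cat_names).isEmpty with
      | true => simpa using hga
      | false => simp
    | cons w2 ws2 =>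
      simp only [hws, List.length_cons, List.isEmpty_cons]
      rw [if_neg (by omega), if_neg (by omega)]
      have hstep : chooseCatsStepA (w :: w2 :: ws2) = (fun yg p =>
          ((fun rel (p : Int × String) =>
              if ((w :: w2 :: ws2).any fun x => PySem.Str.isIn x p.2)
                  && ((w :: w2 :: ws2).any fun x => !PySem.Str.isIn x p.2)
                then PySem.Set.add rel p.1 else rel) yg.1 p,
           (fun rel (p : Int × String) =>
              if ((w :: w2 :: ws2).any fun x => PySem.Str.isIn x p.2)
                  && !((w :: w2 :: ws2).any fun x => !PySem.Str.isIn x p.2)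
                then PySem.Set.add rel p.1 else rel) yg.2 p)) := by
        funext yg p; exact stepA_decomp _ yg p
      rw [hstep, foldl_pair (fun rel (p : Int × String) =>
              if ((w :: w2 :: ws2).any fun x => PySem.Str.isIn x p.2)
                  && ((w :: w2 :: ws2).any fun x => !PySem.Str.isIn x p.2)
                then PySem.Set.add rel p.1 else rel)
          (fun rel (p : Int × String) =>
              if ((w :: w2 :: ws2).any fun x => PySem.Str.isIn x p.2)
                  && !((w :: w2 :: ws2).any fun x => !PySem.Str.isIn x p.2)
                then PySem.Set.add rel p.1 else rel) (PySem.List.enumerate cat_names) PySem.Set.empty PySem.Set.empty,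
        foldl_cond_add _ _ _ (enum_fst_nodup cat_names) (by simp [PySem.Set.empty]),
        foldl_cond_add _ _ _ (enum_fst_nodup cat_names) (by simp [PySem.Set.empty])]
      simp only [PySem.Set.empty, List.nil_append]
      have hgpred : ∀ p : Int × String,
          (((w :: w2 :: ws2).any fun x => PySem.Str.isIn x p.2)
              && !((w :: w2 :: ws2).any fun x => !PySem.Str.isIn x p.2))
            = ((w :: w2 :: ws2).all fun x => PySem.Str.isIn x p.2) := by
        intro p
        rw [← List.all_eq_not_any_not]
        cases hall : ((w :: w2 :: ws2).all fun x => PySem.Str.isIn x p.2) with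
        | true => rw [all_imp_any _ _ _ hall]; rfl
        | false => simp
      have hAg : ((PySem.List.enumerate cat_names).filter
            (fun p => ((w :: w2 :: ws2).any fun x => PySem.Str.isIn x p.2)
                && !((w :: w2 :: ws2).any fun x => !PySem.Str.isIn x p.2))).map (·.1)
          = chooseCatsGreenB (w :: w2 :: ws2) cat_names := by
        refine Eq.trans ?_ hgreen.symm
        exact congrArg (List.map (fun p : Int × String => p.1))
          (List.filter_congr (fun p _ => hgpred p))
      rw [hAg]
      cases hE : chooseCatsGreenB (w :: w2 :: ws2) cat_names with
      | cons a l => simp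
      | nil =>
        have hnone : ∀ p ∈ PySem.List.enumerate cat_names,
            ((w :: w2 :: ws2).all fun x => PySem.Str.isIn x p.2) = false := by
          have h0 : ((PySem.List.enumerate cat_names).filter
              (fun p => (w :: w2 :: ws2).all fun x => PySem.Str.isIn x p.2)) = [] :=
            List.map_eq_nil_iff.mp (hgreen ▸ hE)
          intro p hp
          by_contra hc
          have : p ∈ ([] : List (Int × String)) :=
            h0 ▸ List.mem_filter.mpr ⟨hp, by simpa using hc⟩
          simp at this
        simp only [List.isEmpty_nil, if_true]
        refine Eq.trans ?_ hany.symm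
        refine congrArg (List.map (fun p : Int × String => p.1)) (List.filter_congr ?_)
        intro p hp
        have h1 := hgpred p
        rw [hnone p hp] at h1
        cases hAO : ((w :: w2 :: ws2).any fun x => !PySem.Str.isIn x p.2) with
        | true => simp
        | false =>
          have h1' : ((w :: w2 :: ws2).any fun x => PySem.Str.isIn x p.2) = false := by
            rw [hAO] at h1; simpa using h1
          rw [h1']; rfl
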